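-- pv_equiv track=rewrite | github.com/macleangm-debug/fmcg | backend/sms_gateway.py | get_country_from_phone
-- ===== SOURCE A (Python) =====
-- def get_country_from_phone(phone: str) -> str:
--     """Extract country code from phone number"""
--     country_prefixes = {
--         "+1": "US",  # US/Canada
--         "+44": "GB",
--         "+49": "DE",
--         "+33": "FR",
--         "+34": "ES",
--         "+39": "IT",
--         "+31": "NL",
--         "+61": "AU",
--         "+81": "JP",
--         "+82": "KR",
--         "+86": "CN",
--         "+91": "IN",
--         "+65": "SG",
--         "+852": "HK",
--         "+55": "BR",
--         "+52": "MX",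
--         "+254": "KE",
--         "+234": "NG",
--         "+256": "UG",
--         "+255": "TZ",
--         "+233": "GH",
--         "+27": "ZA",
--         "+250": "RW",
--         "+251": "ET",
--     }
--
--     for prefix, country in sorted(country_prefixes.items(), key=lambda x: -len(x[0])):
--         if phone.startswith(prefix):
--             return country
--
--     return "DEFAULT"
-- ===== SOURCE B (Python) =====
-- def get_country_from_phone(phone: str) -> str:
--     """Extract country code from phone number"""
--     # hard-coded prefix decision tree: match on the first (up to) four characters
--     match list(phone[:4]):
--         case ['+', '1', *_]: return "US"
--         case ['+', '2', '7', *_]: return "ZA"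
--         case ['+', '2', '3', '3']: return "GH"
--         case ['+', '2', '3', '4']: return "NG"
--         case ['+', '2', '5', '0']: return "RW"
--         case ['+', '2', '5', '1']: return "ET"
--         case ['+', '2', '5', '4']: return "KE"
--         case ['+', '2', '5', '5']: return "TZ"
--         case ['+', '2', '5', '6']: return "UG"
--         case ['+', '3', '1', *_]: return "NL"
--         case ['+', '3', '3', *_]: return "FR"
--         case ['+', '3', '4', *_]: return "ES"
--         case ['+', '3', '9', *_]: return "IT"
--         case ['+', '4', '4', *_]: return "GB"
--         case ['+', '4', '9', *_]: return "DE"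
--         case ['+', '5', '2', *_]: return "MX"
--         case ['+', '5', '5', *_]: return "BR"
--         case ['+', '6', '1', *_]: return "AU"
--         case ['+', '6', '5', *_]: return "SG"
--         case ['+', '8', '1', *_]: return "JP"
--         case ['+', '8', '2', *_]: return "KR"
--         case ['+', '8', '5', '2']: return "HK"
--         case ['+', '8', '6', *_]: return "CN"
--         case ['+', '9', '1', *_]: return "IN"
--         case _: return "DEFAULT"
-- ===== Notes on version B (the rewrite author's own statement) =====
-- stated objective: alternative
-- what changed: A sorts all 24 dict entries by descending key length and linearly scans them with startswith; B drops the dict and scan entirely and pattern-matches the first up-to-four characters of the phone against a hard-coded decision tree (one case clause per prefix), correct because the prefix set is prefix-free so at most one prefix can match.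
import Mathlib
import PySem

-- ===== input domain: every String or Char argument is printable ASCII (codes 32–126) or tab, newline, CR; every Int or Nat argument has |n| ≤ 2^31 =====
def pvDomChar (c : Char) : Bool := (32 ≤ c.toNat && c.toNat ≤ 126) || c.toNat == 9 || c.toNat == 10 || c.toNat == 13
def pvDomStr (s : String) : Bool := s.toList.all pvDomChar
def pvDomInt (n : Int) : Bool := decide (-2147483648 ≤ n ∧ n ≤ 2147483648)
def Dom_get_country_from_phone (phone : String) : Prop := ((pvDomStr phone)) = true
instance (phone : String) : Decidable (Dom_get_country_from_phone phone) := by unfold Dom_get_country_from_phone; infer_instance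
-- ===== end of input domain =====

-- B replaces A's sorted linear scan over the prefix dict (startswith per entry) by a
-- hard-coded decision-tree pattern match on the first (up to) four characters (objective: alternative).

-- ===== PORT A =====
-- the literal dict from the Python source
def pvPrefixes : PySem.Dict String String := PySem.Dict.ofList
  [("+1","US"),("+44","GB"),("+49","DE"),("+33","FR"),("+34","ES"),("+39","IT"),
   ("+31","NL"),("+61","AU"),("+81","JP"),("+82","KR"),("+86","CN"),("+91","IN"),
   ("+65","SG"),("+852","HK"),("+55","BR"),("+52","MX"),("+254","KE"),("+234","NG"),
   ("+256","UG"),("+255","TZ"),("+233","GH"),("+27","ZA"),("+250","RW"),("+251","ET")]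

-- the for-loop of A: first entry (in sorted order) whose key is a prefix of phone
def pvScanA (phone : String) : List (String × String) → String
  | [] => "DEFAULT"
  | (pre, country) :: rest =>
      if PySem.Str.startswith phone pre then country else pvScanA phone rest

def get_country_from_phone (phone : String) : String :=
  pvScanA phone
    (PySem.List.sorted pvPrefixes.items (fun x => -(PySem.Str.len x.1 : Int)) false)

-- ===== PORT B =====
-- Source B's `match list(phone[:4])` statement, as a top-level helper (one arm per case clause)
def pvTreeB : List Char → String
  | '+' :: '1' :: _ => "US"
  | '+' :: '2' :: '7' :: _ => "ZA"
  | ['+', '2', '3', '3'] => "GH"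
  | ['+', '2', '3', '4'] => "NG"
  | ['+', '2', '5', '0'] => "RW"
  | ['+', '2', '5', '1'] => "ET"
  | ['+', '2', '5', '4'] => "KE"
  | ['+', '2', '5', '5'] => "TZ"
  | ['+', '2', '5', '6'] => "UG"
  | '+' :: '3' :: '1' :: _ => "NL"
  | '+' :: '3' :: '3' :: _ => "FR"
  | '+' :: '3' :: '4' :: _ => "ES"
  | '+' :: '3' :: '9' :: _ => "IT"
  | '+' :: '4' :: '4' :: _ => "GB"
  | '+' :: '4' :: '9' :: _ => "DE"
  | '+' :: '5' :: '2' :: _ => "MX"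
  | '+' :: '5' :: '5' :: _ => "BR"
  | '+' :: '6' :: '1' :: _ => "AU"
  | '+' :: '6' :: '5' :: _ => "SG"
  | '+' :: '8' :: '1' :: _ => "JP"
  | '+' :: '8' :: '2' :: _ => "KR"
  | ['+', '8', '5', '2'] => "HK"
  | '+' :: '8' :: '6' :: _ => "CN"
  | '+' :: '9' :: '1' :: _ => "IN"
  | _ => "DEFAULT"


def get_country_from_phone_alt (phone : String) : String :=
  pvTreeB (PySem.List.slice phone.toList none (some 4))

-- ===== PRECONDITION & SPEC =====
def Spec_get_country_from_phone (phone : String) (out : String) : Prop := out = get_country_from_phone_alt phone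
instance (phone : String) (out : String) : Decidable (Spec_get_country_from_phone phone out) := by unfold Spec_get_country_from_phone; infer_instance

-- ===== CLAIM (what is proved, stated in full; the proofs are below) =====
def Claim_equal_get_country_from_phone : Prop := ∀ (phone : String), Dom_get_country_from_phone phone → Spec_get_country_from_phone phone (get_country_from_phone phone)

-- ===== LEMMAS AND PROOFS =====

-- A's scan, restated over `List Char` keys (definitionally equal to `pvScanA` on the literal items)
def pvCharScan (l : List Char) : List (List Char × String) → String
  | [] => "DEFAULT"
  | (pre, country) :: rest =>
      if pre.isPrefixOf l then country else pvCharScan l rest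

-- A's sorted item list, evaluated (stable sort by descending key length)
def pvItemsC : List (List Char × String) :=
  [(['+','8','5','2'], "HK"),
   (['+','2','5','4'], "KE"),
   (['+','2','3','4'], "NG"),
   (['+','2','5','6'], "UG"),
   (['+','2','5','5'], "TZ"),
   (['+','2','3','3'], "GH"),
   (['+','2','5','0'], "RW"),
   (['+','2','5','1'], "ET"),
   (['+','4','4'], "GB"),
   (['+','4','9'], "DE"),
   (['+','3','3'], "FR"),
   (['+','3','4'], "ES"),
   (['+','3','9'], "IT"),
   (['+','3','1'], "NL"),
   (['+','6','1'], "AU"),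
   (['+','8','1'], "JP"),
   (['+','8','2'], "KR"),
   (['+','8','6'], "CN"),
   (['+','9','1'], "IN"),
   (['+','6','5'], "SG"),
   (['+','5','5'], "BR"),
   (['+','5','2'], "MX"),
   (['+','2','7'], "ZA"),
   (['+','1'], "US")]

set_option maxHeartbeats 1000000 in
theorem pv_sorted_items_eq :
    (PySem.List.sorted pvPrefixes.items (fun x => -(PySem.Str.len x.1 : Int)) false) =
    [("+852", "HK"), ("+254", "KE"), ("+234", "NG"), ("+256", "UG"), ("+255", "TZ"), ("+233", "GH"), ("+250", "RW"), ("+251", "ET"), ("+44", "GB"), ("+49", "DE"), ("+33", "FR"), ("+34", "ES"), ("+39", "IT"), ("+31", "NL"), ("+61", "AU"), ("+81", "JP"), ("+82", "KR"), ("+86", "CN"), ("+91", "IN"), ("+65", "SG"), ("+55", "BR"), ("+52", "MX"), ("+27", "ZA"), ("+1", "US")] := by decide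

theorem pv_slice4 (l : List Char) : PySem.List.slice l none (some 4) = l.take 4 := by
  simp [pysem]

set_option maxHeartbeats 16000000 in
theorem pvScan_eq_tree (l : List Char) : pvCharScan l pvItemsC = pvTreeB (l.take 4) := by
  rcases l with _ | ⟨c0, _ | ⟨c1, _ | ⟨c2, _ | ⟨c3, rest⟩⟩⟩⟩
  · rfl
  · rw [show [c0].take 4 = [c0] from rfl]
    conv_lhs => simp only [pvItemsC, pvCharScan, List.isPrefixOf_cons₂,
      List.isPrefixOf_nil_left, List.isPrefixOf_cons_nil, Bool.and_true, Bool.and_false]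
    simp only [Bool.false_eq_true, if_false]
    unfold pvTreeB; split <;> simp_all
  · rw [show [c0, c1].take 4 = [c0, c1] from rfl]
    conv_lhs => simp only [pvItemsC, pvCharScan, List.isPrefixOf_cons₂,
      List.isPrefixOf_nil_left, List.isPrefixOf_cons_nil, Bool.and_true, Bool.and_false]
    simp only [Bool.false_eq_true, if_false]
    by_cases h1 : ('+' == c0 && ('1' == c1)) = true
    · rw [if_pos h1]
      simp only [Bool.and_eq_true, beq_iff_eq] at h1
      obtain ⟨rfl, rfl⟩ := h1; rfl
    · rw [if_neg h1]
      simp only [Bool.and_eq_true, beq_iff_eq, not_and] at h1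
      unfold pvTreeB; split <;> simp_all
  · rw [show [c0, c1, c2].take 4 = [c0, c1, c2] from rfl]
    conv_lhs => simp only [pvItemsC, pvCharScan, List.isPrefixOf_cons₂,
      List.isPrefixOf_nil_left, List.isPrefixOf_cons_nil, Bool.and_true, Bool.and_false]
    simp only [Bool.false_eq_true, if_false]
    by_cases h1 : ('+' == c0 && ('4' == c1 && ('4' == c2))) = true
    · rw [if_pos h1]
      simp only [Bool.and_eq_true, beq_iff_eq] at h1
      obtain ⟨rfl, rfl, rfl⟩ := h1; rfl
    · rw [if_neg h1]
      by_cases h2 : ('+' == c0 && ('4' == c1 && ('9' == c2))) = true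
      · rw [if_pos h2]
        simp only [Bool.and_eq_true, beq_iff_eq] at h2
        obtain ⟨rfl, rfl, rfl⟩ := h2; rfl
      · rw [if_neg h2]
        by_cases h3 : ('+' == c0 && ('3' == c1 && ('3' == c2))) = true
        · rw [if_pos h3]
          simp only [Bool.and_eq_true, beq_iff_eq] at h3
          obtain ⟨rfl, rfl, rfl⟩ := h3; rfl
        · rw [if_neg h3]
          by_cases h4 : ('+' == c0 && ('3' == c1 && ('4' == c2))) = true
          · rw [if_pos h4]
            simp only [Bool.and_eq_true, beq_iff_eq] at h4
            obtain ⟨rfl, rfl, rfl⟩ := h4; rfl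
          · rw [if_neg h4]
            by_cases h5 : ('+' == c0 && ('3' == c1 && ('9' == c2))) = true
            · rw [if_pos h5]
              simp only [Bool.and_eq_true, beq_iff_eq] at h5
              obtain ⟨rfl, rfl, rfl⟩ := h5; rfl
            · rw [if_neg h5]
              by_cases h6 : ('+' == c0 && ('3' == c1 && ('1' == c2))) = true
              · rw [if_pos h6]
                simp only [Bool.and_eq_true, beq_iff_eq] at h6
                obtain ⟨rfl, rfl, rfl⟩ := h6; rfl
              · rw [if_neg h6]
                by_cases h7 : ('+' == c0 && ('6' == c1 && ('1' == c2))) = true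
                · rw [if_pos h7]
                  simp only [Bool.and_eq_true, beq_iff_eq] at h7
                  obtain ⟨rfl, rfl, rfl⟩ := h7; rfl
                · rw [if_neg h7]
                  by_cases h8 : ('+' == c0 && ('8' == c1 && ('1' == c2))) = true
                  · rw [if_pos h8]
                    simp only [Bool.and_eq_true, beq_iff_eq] at h8
                    obtain ⟨rfl, rfl, rfl⟩ := h8; rfl
                  · rw [if_neg h8]
                    by_cases h9 : ('+' == c0 && ('8' == c1 && ('2' == c2))) = true
                    · rw [if_pos h9]
                      simp only [Bool.and_eq_true, beq_iff_eq] at h9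
                      obtain ⟨rfl, rfl, rfl⟩ := h9; rfl
                    · rw [if_neg h9]
                      by_cases h10 : ('+' == c0 && ('8' == c1 && ('6' == c2))) = true
                      · rw [if_pos h10]
                        simp only [Bool.and_eq_true, beq_iff_eq] at h10
                        obtain ⟨rfl, rfl, rfl⟩ := h10; rfl
                      · rw [if_neg h10]
                        by_cases h11 : ('+' == c0 && ('9' == c1 && ('1' == c2))) = true
                        · rw [if_pos h11]
                          simp only [Bool.and_eq_true, beq_iff_eq] at h11
                          obtain ⟨rfl, rfl, rfl⟩ := h11; rfl
                        · rw [if_neg h11]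
                          by_cases h12 : ('+' == c0 && ('6' == c1 && ('5' == c2))) = true
                          · rw [if_pos h12]
                            simp only [Bool.and_eq_true, beq_iff_eq] at h12
                            obtain ⟨rfl, rfl, rfl⟩ := h12; rfl
                          · rw [if_neg h12]
                            by_cases h13 : ('+' == c0 && ('5' == c1 && ('5' == c2))) = true
                            · rw [if_pos h13]
                              simp only [Bool.and_eq_true, beq_iff_eq] at h13
                              obtain ⟨rfl, rfl, rfl⟩ := h13; rfl
                            · rw [if_neg h13]
                              by_cases h14 : ('+' == c0 && ('5' == c1 && ('2' == c2))) = true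
                              · rw [if_pos h14]
                                simp only [Bool.and_eq_true, beq_iff_eq] at h14
                                obtain ⟨rfl, rfl, rfl⟩ := h14; rfl
                              · rw [if_neg h14]
                                by_cases h15 : ('+' == c0 && ('2' == c1 && ('7' == c2))) = true
                                · rw [if_pos h15]
                                  simp only [Bool.and_eq_true, beq_iff_eq] at h15
                                  obtain ⟨rfl, rfl, rfl⟩ := h15; rfl
                                · rw [if_neg h15]
                                  by_cases h16 : ('+' == c0 && ('1' == c1)) = true
                                  · rw [if_pos h16]
                                    simp only [Bool.and_eq_true, beq_iff_eq] at h16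
                                    obtain ⟨rfl, rfl⟩ := h16; rfl
                                  · rw [if_neg h16]
                                    simp only [Bool.and_eq_true, beq_iff_eq, not_and] at h1 h2 h3 h4 h5 h6 h7 h8 h9 h10 h11 h12 h13 h14 h15 h16
                                    unfold pvTreeB; split <;> simp_all
  · rw [show (c0 :: c1 :: c2 :: c3 :: rest).take 4 = [c0, c1, c2, c3] from rfl]
    conv_lhs => simp only [pvItemsC, pvCharScan, List.isPrefixOf_cons₂,
      List.isPrefixOf_nil_left, List.isPrefixOf_cons_nil, Bool.and_true, Bool.and_false]
    by_cases h1 : ('+' == c0 && ('8' == c1 && ('5' == c2 && ('2' == c3)))) = true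
    · rw [if_pos h1]
      simp only [Bool.and_eq_true, beq_iff_eq] at h1
      obtain ⟨rfl, rfl, rfl, rfl⟩ := h1; rfl
    · rw [if_neg h1]
      by_cases h2 : ('+' == c0 && ('2' == c1 && ('5' == c2 && ('4' == c3)))) = true
      · rw [if_pos h2]
        simp only [Bool.and_eq_true, beq_iff_eq] at h2
        obtain ⟨rfl, rfl, rfl, rfl⟩ := h2; rfl
      · rw [if_neg h2]
        by_cases h3 : ('+' == c0 && ('2' == c1 && ('3' == c2 && ('4' == c3)))) = true
        · rw [if_pos h3]
          simp only [Bool.and_eq_true, beq_iff_eq] at h3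
          obtain ⟨rfl, rfl, rfl, rfl⟩ := h3; rfl
        · rw [if_neg h3]
          by_cases h4 : ('+' == c0 && ('2' == c1 && ('5' == c2 && ('6' == c3)))) = true
          · rw [if_pos h4]
            simp only [Bool.and_eq_true, beq_iff_eq] at h4
            obtain ⟨rfl, rfl, rfl, rfl⟩ := h4; rfl
          · rw [if_neg h4]
            by_cases h5 : ('+' == c0 && ('2' == c1 && ('5' == c2 && ('5' == c3)))) = true
            · rw [if_pos h5]
              simp only [Bool.and_eq_true, beq_iff_eq] at h5
              obtain ⟨rfl, rfl, rfl, rfl⟩ := h5; rfl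
            · rw [if_neg h5]
              by_cases h6 : ('+' == c0 && ('2' == c1 && ('3' == c2 && ('3' == c3)))) = true
              · rw [if_pos h6]
                simp only [Bool.and_eq_true, beq_iff_eq] at h6
                obtain ⟨rfl, rfl, rfl, rfl⟩ := h6; rfl
              · rw [if_neg h6]
                by_cases h7 : ('+' == c0 && ('2' == c1 && ('5' == c2 && ('0' == c3)))) = true
                · rw [if_pos h7]
                  simp only [Bool.and_eq_true, beq_iff_eq] at h7
                  obtain ⟨rfl, rfl, rfl, rfl⟩ := h7; rfl
                · rw [if_neg h7]
                  by_cases h8 : ('+' == c0 && ('2' == c1 && ('5' == c2 && ('1' == c3)))) = true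
                  · rw [if_pos h8]
                    simp only [Bool.and_eq_true, beq_iff_eq] at h8
                    obtain ⟨rfl, rfl, rfl, rfl⟩ := h8; rfl
                  · rw [if_neg h8]
                    by_cases h9 : ('+' == c0 && ('4' == c1 && ('4' == c2))) = true
                    · rw [if_pos h9]
                      simp only [Bool.and_eq_true, beq_iff_eq] at h9
                      obtain ⟨rfl, rfl, rfl⟩ := h9; rfl
                    · rw [if_neg h9]
                      by_cases h10 : ('+' == c0 && ('4' == c1 && ('9' == c2))) = true
                      · rw [if_pos h10]
                        simp only [Bool.and_eq_true, beq_iff_eq] at h10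
                        obtain ⟨rfl, rfl, rfl⟩ := h10; rfl
                      · rw [if_neg h10]
                        by_cases h11 : ('+' == c0 && ('3' == c1 && ('3' == c2))) = true
                        · rw [if_pos h11]
                          simp only [Bool.and_eq_true, beq_iff_eq] at h11
                          obtain ⟨rfl, rfl, rfl⟩ := h11; rfl
                        · rw [if_neg h11]
                          by_cases h12 : ('+' == c0 && ('3' == c1 && ('4' == c2))) = true
                          · rw [if_pos h12]
                            simp only [Bool.and_eq_true, beq_iff_eq] at h12
                            obtain ⟨rfl, rfl, rfl⟩ := h12; rfl
                          · rw [if_neg h12]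
                            by_cases h13 : ('+' == c0 && ('3' == c1 && ('9' == c2))) = true
                            · rw [if_pos h13]
                              simp only [Bool.and_eq_true, beq_iff_eq] at h13
                              obtain ⟨rfl, rfl, rfl⟩ := h13; rfl
                            · rw [if_neg h13]
                              by_cases h14 : ('+' == c0 && ('3' == c1 && ('1' == c2))) = true
                              · rw [if_pos h14]
                                simp only [Bool.and_eq_true, beq_iff_eq] at h14
                                obtain ⟨rfl, rfl, rfl⟩ := h14; rfl
                              · rw [if_neg h14]
                                by_cases h15 : ('+' == c0 && ('6' == c1 && ('1' == c2))) = true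
                                · rw [if_pos h15]
                                  simp only [Bool.and_eq_true, beq_iff_eq] at h15
                                  obtain ⟨rfl, rfl, rfl⟩ := h15; rfl
                                · rw [if_neg h15]
                                  by_cases h16 : ('+' == c0 && ('8' == c1 && ('1' == c2))) = true
                                  · rw [if_pos h16]
                                    simp only [Bool.and_eq_true, beq_iff_eq] at h16
                                    obtain ⟨rfl, rfl, rfl⟩ := h16; rfl
                                  · rw [if_neg h16]
                                    by_cases h17 : ('+' == c0 && ('8' == c1 && ('2' == c2))) = true
                                    · rw [if_pos h17]
                                      simp only [Bool.and_eq_true, beq_iff_eq] at h17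
                                      obtain ⟨rfl, rfl, rfl⟩ := h17; rfl
                                    · rw [if_neg h17]
                                      by_cases h18 : ('+' == c0 && ('8' == c1 && ('6' == c2))) = true
                                      · rw [if_pos h18]
                                        simp only [Bool.and_eq_true, beq_iff_eq] at h18
                                        obtain ⟨rfl, rfl, rfl⟩ := h18; rfl
                                      · rw [if_neg h18]
                                        by_cases h19 : ('+' == c0 && ('9' == c1 && ('1' == c2))) = true
                                        · rw [if_pos h19]
                                          simp only [Bool.and_eq_true, beq_iff_eq] at h19
                                          obtain ⟨rfl, rfl, rfl⟩ := h19; rfl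
                                        · rw [if_neg h19]
                                          by_cases h20 : ('+' == c0 && ('6' == c1 && ('5' == c2))) = true
                                          · rw [if_pos h20]
                                            simp only [Bool.and_eq_true, beq_iff_eq] at h20
                                            obtain ⟨rfl, rfl, rfl⟩ := h20; rfl
                                          · rw [if_neg h20]
                                            by_cases h21 : ('+' == c0 && ('5' == c1 && ('5' == c2))) = true
                                            · rw [if_pos h21]
                                              simp only [Bool.and_eq_true, beq_iff_eq] at h21
                                              obtain ⟨rfl, rfl, rfl⟩ := h21; rfl
                                            · rw [if_neg h21]
                                              by_cases h22 : ('+' == c0 && ('5' == c1 && ('2' == c2))) = true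
                                              · rw [if_pos h22]
                                                simp only [Bool.and_eq_true, beq_iff_eq] at h22
                                                obtain ⟨rfl, rfl, rfl⟩ := h22; rfl
                                              · rw [if_neg h22]
                                                by_cases h23 : ('+' == c0 && ('2' == c1 && ('7' == c2))) = true
                                                · rw [if_pos h23]
                                                  simp only [Bool.and_eq_true, beq_iff_eq] at h23
                                                  obtain ⟨rfl, rfl, rfl⟩ := h23; rfl
                                                · rw [if_neg h23]
                                                  by_cases h24 : ('+' == c0 && ('1' == c1)) = true
                                                  · rw [if_pos h24]
                                                    simp only [Bool.and_eq_true, beq_iff_eq] at h24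
                                                    obtain ⟨rfl, rfl⟩ := h24; rfl
                                                  · rw [if_neg h24]
                                                    simp only [Bool.and_eq_true, beq_iff_eq, not_and] at h1 h2 h3 h4 h5 h6 h7 h8 h9 h10 h11 h12 h13 h14 h15 h16 h17 h18 h19 h20 h21 h22 h23 h24
                                                    unfold pvTreeB; split <;> simp_all

theorem pv_key_lemma (phone : String) :
    get_country_from_phone phone = get_country_from_phone_alt phone := by
  have hA : get_country_from_phone phone = pvCharScan phone.toList pvItemsC := by
    unfold get_country_from_phone
    rw [pv_sorted_items_eq]
    rfl
  have hB : get_country_from_phone_alt phone = pvTreeB (phone.toList.take 4) := by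
    unfold get_country_from_phone_alt
    rw [pv_slice4]
  rw [hA, hB, pvScan_eq_tree]

-- ===== VERDICT (by name: the statement is the Claim_ definition above) =====
theorem get_country_from_phone_spec : Claim_equal_get_country_from_phone := by
  intro phone _
  unfold Spec_get_country_from_phone
  exact pv_key_lemma phone
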